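-- pv_equiv track=rewrite | github.com/p-lots/codewars | 6-kyu/simple-fun-#305--typist/python/solution.py | typist
-- ===== SOURCE A (Python) =====
-- def typist(s):
--     ret = len(s)
--     if s and s[0].isupper():
--         ret += 1
--     for first, second in zip(s, s[1:]):
--         if not (first.isupper() == second.isupper()):
--             ret += 1
--     return ret
-- ===== SOURCE B (Python) =====
-- def typist(s):
--     # Keystrokes = len(s) + 2 * (number of maximal uppercase runs) - (1 if s ends uppercase).
--     # Each uppercase run costs one shift press to enter and one to leave, except a
--     # run ending at the end of the string, which is never left.
--     words = ''.join(c if c.isupper() else ' ' for c in s).split()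
--     return len(s) + 2 * len(words) - (1 if s and s[-1].isupper() else 0)
-- ===== Notes on version B (the rewrite author's own statement) =====
-- stated objective: alternative
-- what changed: B replaces A's pairwise adjacent-case scan by masking non-uppercase characters to spaces, counting the maximal uppercase runs with str.split(), and applying the closed formula len(s) + 2*runs - (ends uppercase), instead of adding 1 per adjacent case transition.
import Mathlib
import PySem

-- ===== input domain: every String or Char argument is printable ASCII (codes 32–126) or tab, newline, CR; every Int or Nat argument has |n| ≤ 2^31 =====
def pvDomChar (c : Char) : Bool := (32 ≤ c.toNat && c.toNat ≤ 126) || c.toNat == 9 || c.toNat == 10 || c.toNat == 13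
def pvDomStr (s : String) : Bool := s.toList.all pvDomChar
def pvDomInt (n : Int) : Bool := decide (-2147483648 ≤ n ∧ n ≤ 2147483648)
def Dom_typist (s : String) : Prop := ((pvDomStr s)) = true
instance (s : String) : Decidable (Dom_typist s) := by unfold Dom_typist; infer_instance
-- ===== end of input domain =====

-- B replaces A's adjacent-case transition scan by masking non-uppercase chars to spaces, counting the uppercase runs with split(), and a closed formula: alternative algorithm, same O(n) cost.


-- ===== PORT A =====
def typist (s : String) : Int :=
  let l := s.toList
  let ret : Int := l.length
  let ret : Int :=
    match l with
    | [] => ret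
    | c :: _ => if PySem.Chars.isupper c then ret + 1 else ret
  (l.zip l.tail).foldl
    (fun r p => if (PySem.Chars.isupper p.1 == PySem.Chars.isupper p.2) then r else r + 1) ret

-- ===== PORT B =====
def typist_alt (s : String) : Int :=
  let words := PySem.Chars.split₀
    (s.toList.map (fun c => if PySem.Chars.isupper c then c else ' '))
  (s.toList.length : Int) + 2 * words.length
    - (match s.toList.getLast? with
       | some c => if PySem.Chars.isupper c then 1 else 0
       | none => 0)

-- ===== PRECONDITION & SPEC =====
def Spec_typist (s : String) (out : Int) : Prop := out = typist_alt s
instance (s : String) (out : Int) : Decidable (Spec_typist s out) := by unfold Spec_typist; infer_instance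

-- ===== CLAIM (what is proved, stated in full; the proofs are below) =====
def Claim_equal_typist : Prop := ∀ (s : String), Dom_typist s → Spec_typist s (typist s)

-- ===== LEMMAS AND PROOFS =====

-- number of case transitions in the sequence u, cases(l)
def caseTrans (u : Bool) : List Char → Int
  | [] => 0
  | c :: cs =>
    (if PySem.Chars.isupper c = u then 0 else 1) + caseTrans (PySem.Chars.isupper c) cs

-- number of words of l, given whether a word is currently open
def wordCount (inw : Bool) : List Char → Int
  | [] => if inw then 1 else 0
  | c :: cs =>
    if PySem.Chars.isspace c then (if inw then 1 else 0) + wordCount false cs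
    else wordCount true cs

-- the case of the last char of l, defaulting to u
def lastCase (u : Bool) : List Char → Bool
  | [] => u
  | c :: cs => lastCase (PySem.Chars.isupper c) cs

theorem isspace_eq_false_of_isupper (c : Char) (h : PySem.Chars.isupper c = true) :
    PySem.Chars.isspace c = false := by
  simp only [PySem.Chars.isupper, Bool.and_eq_true, decide_eq_true_eq, Char.le_def,
    UInt32.le_iff_toNat_le] at h
  simp only [PySem.Chars.isspace]
  have h1 : ('A').val.toNat = 65 := by decide
  have h2 : ('Z').val.toNat = 90 := by decide
  rw [h1, h2] at h
  have hc : c.toNat = c.val.toNat := rfl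
  simp only [Bool.or_eq_false_iff, Bool.and_eq_false_iff, decide_eq_false_iff_not, hc]
  omega

theorem zip_fold_eq_caseTrans (cs : List Char) :
    ∀ (c : Char) (r : Int),
      (((c :: cs).zip cs).foldl
        (fun r p => if (PySem.Chars.isupper p.1 == PySem.Chars.isupper p.2) then r else r + 1) r)
      = r + caseTrans (PySem.Chars.isupper c) cs := by
  induction cs with
  | nil => intro c r; simp [caseTrans]
  | cons c2 rest ih =>
    intro c r
    simp only [List.zip_cons_cons, List.foldl_cons, ih c2, caseTrans]
    by_cases h : PySem.Chars.isupper c2 = PySem.Chars.isupper c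
    · simp [h]
    · have hne : (PySem.Chars.isupper c == PySem.Chars.isupper c2) = false := by
        cases hc : PySem.Chars.isupper c <;> cases hc2 : PySem.Chars.isupper c2 <;> simp_all
      have hne' : ¬ PySem.Chars.isupper c2 = PySem.Chars.isupper c := h
      simp only [hne, if_false, if_neg hne', Bool.false_eq_true]
      ring

theorem split₀_go_length (m : List Char) :
    ∀ (cur : List Char) (acc : List (List Char)),
      ((PySem.Chars.split₀.go m cur acc).length : Int)
        = acc.length + wordCount (!cur.isEmpty) m := by
  induction m with
  | nil =>
    intro cur acc
    cases cur <;> simp [PySem.Chars.split₀.go, wordCount]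
  | cons c rest ih =>
    intro cur acc
    by_cases hs : PySem.Chars.isspace c = true
    · cases cur with
      | nil => simp [PySem.Chars.split₀.go, hs, ih, wordCount]
      | cons x xs =>
        simp only [PySem.Chars.split₀.go, hs, if_true, List.isEmpty_cons, wordCount,
          Bool.false_eq_true, if_false]
        rw [ih]
        simp
        ring
    · simp only [Bool.not_eq_true] at hs
      simp [PySem.Chars.split₀.go, hs, ih, wordCount]

theorem split₀_length (m : List Char) :
    ((PySem.Chars.split₀ m).length : Int) = wordCount false m := by
  simpa using split₀_go_length m [] []

theorem caseTrans_eq_words (l : List Char) :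
    ∀ (u : Bool),
      caseTrans u l
        = 2 * wordCount u (l.map (fun c => if PySem.Chars.isupper c then c else ' '))
          - (if u then 1 else 0) - (if lastCase u l then 1 else 0) := by
  induction l with
  | nil => intro u; cases u <;> simp [caseTrans, wordCount, lastCase]
  | cons c cs ih =>
    intro u
    by_cases hv : PySem.Chars.isupper c = true
    · have hsp := isspace_eq_false_of_isupper c hv
      simp only [caseTrans, lastCase, List.map_cons, hv, if_true, wordCount, hsp,
        Bool.false_eq_true, if_false, ih true]
      cases u
      · simp
        ring
      · simp
    · simp only [Bool.not_eq_true] at hv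
      have hsp : PySem.Chars.isspace ' ' = true := by decide
      simp only [caseTrans, lastCase, List.map_cons, hv, Bool.false_eq_true, if_false,
        wordCount, hsp, if_true, ih false]
      cases u
      · simp
      · simp
        ring

theorem lastCase_eq_getLast? (l : List Char) :
    ∀ (u : Bool), lastCase u l = (l.getLast?.map PySem.Chars.isupper).getD u := by
  induction l with
  | nil => intro u; simp [lastCase]
  | cons c cs ih =>
    intro u
    rw [show lastCase u (c :: cs) = lastCase (PySem.Chars.isupper c) cs from rfl, ih]
    cases hcs : cs with
    | nil => simp
    | cons d ds =>
      rw [List.getLast?_cons_cons,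
        List.getLast?_eq_some_getLast (by simp : d :: ds ≠ ([] : List Char))]
      simp

-- ===== VERDICT (by name: the statement is the Claim_ definition above) =====
theorem typist_spec : Claim_equal_typist := by
  intro s _
  unfold Spec_typist typist typist_alt
  cases hl : s.toList with
  | nil => simp [PySem.Chars.split₀, PySem.Chars.split₀.go]
  | cons c cs =>
    simp only [List.tail_cons, List.length_cons, List.map_cons]
    rw [zip_fold_eq_caseTrans]
    have hmain := caseTrans_eq_words (c :: cs) false
    have hlen := split₀_length ((c :: cs).map (fun c => if PySem.Chars.isupper c then c else ' '))
    have hlast := lastCase_eq_getLast? (c :: cs) false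
    have hne : c :: cs ≠ [] := by simp
    rw [List.getLast?_eq_some_getLast hne, Option.map_some, Option.getD_some] at hlast
    rw [List.getLast?_eq_some_getLast hne]
    simp only [List.map_cons] at hlen
    rw [hlen]
    have hF : caseTrans false (c :: cs)
        = (if PySem.Chars.isupper c = false then 0 else 1)
            + caseTrans (PySem.Chars.isupper c) cs := rfl
    rw [hF] at hmain
    have hmatch : (match some ((c :: cs).getLast hne) with
        | some c => if PySem.Chars.isupper c = true then (1 : Int) else 0
        | none => 0)
        = if PySem.Chars.isupper ((c :: cs).getLast hne) = true then (1 : Int) else 0 := rfl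
    rw [hmatch, ← hlast]
    cases hu : PySem.Chars.isupper c <;>
      cases hv : lastCase false (c :: cs) <;>
        simp only [hu, hv, Bool.false_eq_true, Bool.true_eq_false, if_false, if_true,
          List.map_cons] at hmain ⊢ <;> omega
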